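-- pv_equiv track=rewrite | github.com/gdincu/UBB_PostUni | Sem2/Administrarea si securitatea sistemelor de calcul/Laboratoare/netmask.py | determina_netmask_bin
-- ===== SOURCE A (Python) =====
-- def determina_netmask_bin(putere):
--     """
--     Determina netmask-ul potrivit
--     :param (int) putere: numarul de 0-uri din netmask
--     :return (str) netmask: string reprezentand netmask-ul
--     """
--     ones = 32 - putere
--     str_bin_netmask = ""
--
--     for i in range(0, 32):
--         if i < ones:
--             str_bin_netmask += "1"
--         else:
--             str_bin_netmask += "0"
--         if len(str_bin_netmask.replace(".", "")) % 8 == 0: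
--             str_bin_netmask += "."
--
--     return str_bin_netmask[:len(str_bin_netmask)-1]
-- ===== SOURCE B (Python) =====
-- def determina_netmask_bin(putere):
--     ones = max(0, min(32, 32 - putere))
--     bits = "1" * ones + "0" * (32 - ones)
--     return ".".join(bits[i:i+8] for i in range(0, 32, 8))
-- ===== Notes on version B (the rewrite author's own statement) =====
-- stated objective: simpler
-- what changed: Replaces A's per-bit loop with its inline dot insertion and trailing-dot strip by a closed-form bit string (ones clamped to the valid range, then '1'*ones + '0'*zeros) sliced into four octets joined with dots.
import Mathlib
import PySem

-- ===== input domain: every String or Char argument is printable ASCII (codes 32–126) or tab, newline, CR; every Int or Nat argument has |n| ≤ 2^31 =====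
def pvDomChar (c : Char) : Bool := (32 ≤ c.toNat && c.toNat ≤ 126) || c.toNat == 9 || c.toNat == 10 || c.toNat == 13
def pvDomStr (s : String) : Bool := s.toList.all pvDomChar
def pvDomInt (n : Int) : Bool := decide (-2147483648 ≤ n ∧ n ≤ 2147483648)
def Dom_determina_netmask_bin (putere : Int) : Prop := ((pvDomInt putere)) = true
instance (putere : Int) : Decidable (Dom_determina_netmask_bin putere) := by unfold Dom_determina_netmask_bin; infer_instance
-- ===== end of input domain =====

-- A = B: B replaces A's 32-step per-bit loop (with inline dot insertion and a
-- trailing-dot strip) by a closed-form bit string sliced into four dotted octets.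


-- ===== PORT A =====
-- literal transliteration: str state as List Char; += "1"/"0", the replace/len%8
-- dot test each step, and the final s[:len(s)-1] slice
def determina_netmask_bin (putere : Int) : String :=
  let ones : Int := 32 - putere
  let cs : List Char := (PySem.List.pyRange 0 32 1).foldl (fun cs i =>
      let cs := cs ++ (if i < ones then ['1'] else ['0'])
      if PySem.Int.mod (PySem.Chars.len (PySem.Chars.replace cs ['.'] [])) 8 == 0
      then cs ++ ['.'] else cs) []
  String.ofList (PySem.Chars.slice cs none (some (PySem.Chars.len cs - 1)))

-- ===== PORT B =====
-- ".".join(bits[i:i+8] for i in range(0, 32, 8))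
def pvOctetsJoin (bits : List Char) : List Char :=
  PySem.Chars.join ['.']
    ((PySem.List.pyRange 0 32 8).map (fun i => PySem.Chars.slice bits (some i) (some (i + 8))))

def determina_netmask_bin_alt (putere : Int) : String :=
  let ones : Int := max 0 (min 32 (32 - putere))
  let bits : List Char := List.replicate ones.toNat '1' ++ List.replicate (32 - ones).toNat '0'
  String.ofList (pvOctetsJoin bits)

-- ===== PRECONDITION & SPEC =====
def Spec_determina_netmask_bin (putere : Int) (out : String) : Prop := out = determina_netmask_bin_alt putere
instance (putere : Int) (out : String) : Decidable (Spec_determina_netmask_bin putere out) := by unfold Spec_determina_netmask_bin; infer_instance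

-- ===== CLAIM (what is proved, stated in full; the proofs are below) =====
def Claim_equal_determina_netmask_bin : Prop := ∀ (putere : Int), Dom_determina_netmask_bin putere → Spec_determina_netmask_bin putere (determina_netmask_bin putere)

-- ===== LEMMAS AND PROOFS =====

-- A's loop body with the (already clamped) number of ones as parameter
def pvCoreA (k : Int) : String :=
  let cs : List Char := (PySem.List.pyRange 0 32 1).foldl (fun cs i =>
      let cs := cs ++ (if i < k then ['1'] else ['0'])
      if PySem.Int.mod (PySem.Chars.len (PySem.Chars.replace cs ['.'] [])) 8 == 0
      then cs ++ ['.'] else cs) []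
  String.ofList (PySem.Chars.slice cs none (some (PySem.Chars.len cs - 1)))

def pvCoreB (k : Int) : String :=
  String.ofList (pvOctetsJoin (List.replicate k.toNat '1' ++ List.replicate (32 - k).toNat '0'))

lemma pvA_factor (p : Int) :
    determina_netmask_bin p = pvCoreA (max 0 (min 32 (32 - p))) := by
  unfold determina_netmask_bin pvCoreA
  have h := PySem.List.foldl_congr_mem (PySem.List.pyRange 0 32 1)
      (fun cs i =>
        let cs := cs ++ (if i < 32 - p then ['1'] else ['0'])
        if PySem.Int.mod (PySem.Chars.len (PySem.Chars.replace cs ['.'] [])) 8 == 0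
        then cs ++ ['.'] else cs)
      (fun cs i =>
        let cs := cs ++ (if i < max 0 (min 32 (32 - p)) then ['1'] else ['0'])
        if PySem.Int.mod (PySem.Chars.len (PySem.Chars.replace cs ['.'] [])) 8 == 0
        then cs ++ ['.'] else cs)
      []
      (by intro acc x hx
          rw [PySem.List.mem_pyRange_one] at hx
          have hiff : (x < 32 - p) ↔ (x < max 0 (min 32 (32 - p))) := by omega
          simp only [hiff])
  simp only [h]

lemma pvB_factor (p : Int) :
    determina_netmask_bin_alt p = pvCoreB (max 0 (min 32 (32 - p))) := rfl

set_option maxRecDepth 100000 in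
lemma pvCore_eq : ∀ k : Fin 33, pvCoreA (k.1 : Int) = pvCoreB (k.1 : Int) := by decide

-- ===== VERDICT (by name: the statement is the Claim_ definition above) =====
theorem determina_netmask_bin_spec : Claim_equal_determina_netmask_bin := by
  intro p _
  unfold Spec_determina_netmask_bin
  rw [pvA_factor p, pvB_factor p]
  have hk : (max 0 (min 32 (32 - p))).toNat < 33 := by omega
  have h := pvCore_eq ⟨(max 0 (min 32 (32 - p))).toNat, hk⟩
  simpa [Int.toNat_of_nonneg (by omega : (0:Int) ≤ max 0 (min 32 (32 - p)))] using h
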